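-- pv_equiv track=rewrite | github.com/simachami/Week-2-Day-1 | wb.py | count_counstructed_strings
-- ===== SOURCE A (Python) =====
-- def count_counstructed_strings(string1,string2):
--     letter_count = {}
--     for letter in string1:
--         letter_count[letter] = 0
--     for letter in string2:
--         if letter in letter_count:
--             letter_count[letter] += 1
--     return min(letter_count.values())
-- ===== SOURCE B (Python) =====
-- def count_counstructed_strings(string1, string2):
--     # Simulation: repeatedly "construct" one copy of string1's distinct letters
--     # by removing one occurrence of each from a pool of string2's letters,
--     # counting how many full rounds succeed.
--     needed = set(string1)
--     pool = list(string2)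
--     rounds = 0
--     while needed and all(ch in pool for ch in needed):
--         for ch in needed:
--             pool.remove(ch)
--         rounds += 1
--     return rounds
-- ===== Notes on version B (the rewrite author's own statement) =====
-- stated objective: alternative
-- what changed: Replaces A's count-table (dict of per-letter counts, then min of the values) with a round-by-round simulation: repeatedly remove one occurrence of each distinct letter of string1 from a mutable pool of string2's letters and count the successful rounds; no counts are ever computed.
import Mathlib
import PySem

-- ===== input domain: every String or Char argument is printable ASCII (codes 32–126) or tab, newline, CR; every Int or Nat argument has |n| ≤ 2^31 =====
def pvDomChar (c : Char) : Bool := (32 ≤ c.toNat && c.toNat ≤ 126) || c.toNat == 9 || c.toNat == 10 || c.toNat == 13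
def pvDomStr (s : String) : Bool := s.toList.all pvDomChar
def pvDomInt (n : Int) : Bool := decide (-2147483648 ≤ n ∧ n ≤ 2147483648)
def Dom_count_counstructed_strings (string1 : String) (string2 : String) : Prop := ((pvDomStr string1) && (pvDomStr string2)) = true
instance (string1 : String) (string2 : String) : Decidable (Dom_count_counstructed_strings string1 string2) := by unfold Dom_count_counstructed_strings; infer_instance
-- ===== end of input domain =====

-- B replaces A's count table (dict, then min of values) by a round-by-round simulation
-- that repeatedly removes one copy of each distinct letter of string1 from a pool of
-- string2's letters, counting the rounds (alternative algorithm, no counts computed);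
-- equivalence is about the return value only.

-- ===== PORT A =====
def count_counstructed_strings (string1 : String) (string2 : String) : Int :=
  let d0 : PySem.Dict Char Int :=
    string1.toList.foldl (fun d letter => d.insert letter 0) PySem.Dict.empty
  let d1 : PySem.Dict Char Int :=
    string2.toList.foldl
      (fun d letter => if d.contains letter then d.modify letter 0 (· + 1) else d) d0
  match PySem.List.min? d1.values (fun x => x) with
  | some m => m
  | none => 0    -- Python's min([]) raises ValueError; excluded by Pre_

-- ===== PORT B =====
-- one round of the for-loop: pool.remove(ch) for each needed ch (remove? never fails
-- when the while-guard held; getD pool only totalises the Python ValueError case)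
def pvRemoveAll (needed pool : List Char) : List Char :=
  needed.foldl (fun p ch => (PySem.List.remove? p ch).getD p) pool

-- the while-loop; fuel = pool.length + 1 is a termination guard only (each round
-- strictly shrinks the pool, so the fuel is never exhausted)
def pvLoop : Nat → List Char → List Char → Int → Int
  | 0, _, _, rounds => rounds
  | fuel+1, needed, pool, rounds =>
    if needed ≠ [] ∧ needed.all (fun ch => pool.contains ch) then
      pvLoop fuel needed (pvRemoveAll needed pool) (rounds + 1)
    else rounds

def count_counstructed_strings_alt (string1 : String) (string2 : String) : Int :=
  pvLoop (string2.toList.length + 1) (PySem.Set.ofList string1.toList) string2.toList 0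

-- ===== PRECONDITION & SPEC =====
-- A raises ValueError (min of an empty dict's values) exactly when string1 is empty.
def Pre_count_counstructed_strings (string1 : String) (string2 : String) : Prop := string1 ≠ ""
instance (string1 : String) (string2 : String) : Decidable (Pre_count_counstructed_strings string1 string2) := by unfold Pre_count_counstructed_strings; infer_instance
def pvWitness_count_counstructed_strings : String × String := ("ab", "abb")

def Spec_count_counstructed_strings (string1 : String) (string2 : String) (out : Int) : Prop := out = count_counstructed_strings_alt string1 string2
instance (string1 : String) (string2 : String) (out : Int) : Decidable (Spec_count_counstructed_strings string1 string2 out) := by unfold Spec_count_counstructed_strings; infer_instance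

-- ===== CLAIM (what is proved, stated in full; the proofs are below) =====
def Claim_equal_count_counstructed_strings : Prop := ∀ (string1 : String) (string2 : String), Dom_count_counstructed_strings string1 string2 → Pre_count_counstructed_strings string1 string2 → Spec_count_counstructed_strings string1 string2 (count_counstructed_strings string1 string2)
-- ===== LEMMAS AND PROOFS =====

-- min of the per-letter counts, written with the head split off (the shape min?_id_cons gives)
def pvMC (needed pool : List Char) : Int :=
  match needed with
  | [] => 0
  | c :: t => (t.map (fun ch => (pool.count ch : Int))).foldl min ((pool.count c : Int))

theorem pvRemoveAll_count (needed pool : List Char) (hnd : needed.Nodup)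
    (hall : ∀ x ∈ needed, x ∈ pool) (x : Char) :
    (pvRemoveAll needed pool).count x = pool.count x - (if x ∈ needed then 1 else 0) := by
  induction needed generalizing pool with
  | nil => simp [pvRemoveAll]
  | cons c t ih =>
    have hc : c ∈ pool := hall c (by simp)
    have hct : c ∉ t := (List.nodup_cons.mp hnd).1
    have hstep : pvRemoveAll (c :: t) pool = pvRemoveAll t (pool.erase c) := by
      simp [pvRemoveAll, PySem.List.remove?_eq_some_erase _ _ hc]
    have hall' : ∀ y ∈ t, y ∈ pool.erase c := by
      intro y hy
      have hyc : y ≠ c := by rintro rfl; exact hct hy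
      exact (List.mem_erase_of_ne hyc).mpr (hall y (List.mem_cons_of_mem _ hy))
    rw [hstep, ih (pool.erase c) hnd.of_cons hall']
    by_cases hxc : x = c
    · subst hxc
      simp [hct, List.count_erase_self]
    · rw [List.count_erase_of_ne hxc]
      by_cases hxt : x ∈ t <;> simp [hxt, hxc]

theorem pvRemoveAll_length_le (needed pool : List Char) :
    (pvRemoveAll needed pool).length ≤ pool.length := by
  induction needed generalizing pool with
  | nil => simp [pvRemoveAll]
  | cons c t ih =>
    have hstep : pvRemoveAll (c :: t) pool = pvRemoveAll t ((PySem.List.remove? pool c).getD pool) := by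
      simp [pvRemoveAll]
    rw [hstep]
    refine le_trans (ih _) ?_
    cases h : PySem.List.remove? pool c with
    | none => simp
    | some r =>
      have hc : c ∈ pool := by
        by_contra hn
        rw [(PySem.List.remove?_eq_none_iff pool c).mpr hn] at h; cases h
      rw [PySem.List.remove?_eq_some_erase _ _ hc] at h
      cases h
      simpa using List.length_erase_le (l := pool) (a := c)

theorem pvRemoveAll_length_lt (c : Char) (t : List Char) (pool : List Char) (hc : c ∈ pool) :
    (pvRemoveAll (c :: t) pool).length < pool.length := by
  have hstep : pvRemoveAll (c :: t) pool = pvRemoveAll t (pool.erase c) := by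
    simp [pvRemoveAll, PySem.List.remove?_eq_some_erase _ _ hc]
  rw [hstep]
  calc (pvRemoveAll t (pool.erase c)).length ≤ (pool.erase c).length := pvRemoveAll_length_le _ _
    _ < pool.length := by
        rw [List.length_erase_of_mem hc]
        exact Nat.sub_lt (List.length_pos_of_mem hc) one_pos

theorem foldl_min_le_init (l : List Int) (a : Int) : l.foldl min a ≤ a := by
  induction l generalizing a with
  | nil => simp
  | cons x t ih => exact le_trans (ih (min a x)) (min_le_left _ _)

theorem foldl_min_le_mem (l : List Int) (a : Int) (x : Int) (hx : x ∈ l) :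
    l.foldl min a ≤ x := by
  induction l generalizing a with
  | nil => cases hx
  | cons y t ih =>
    rcases List.mem_cons.mp hx with h | h
    · subst h
      exact le_trans (foldl_min_le_init t (min a x)) (min_le_right _ _)
    · exact ih _ h

theorem foldl_min_nonneg (l : List Int) (a : Int) (ha : 0 ≤ a)
    (hl : ∀ y ∈ l, 0 ≤ y) : 0 ≤ l.foldl min a := by
  induction l generalizing a with
  | nil => simpa
  | cons x t ih =>
    exact ih (min a x) (le_min ha (hl x (by simp))) (fun y hy => hl y (by simp [hy]))

theorem foldl_min_sub_one (l : List Char) (g h : Char → Int) (a b : Int)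
    (hab : a = b - 1) (hgh : ∀ x ∈ l, g x = h x - 1) :
    (l.map g).foldl min a = (l.map h).foldl min b - 1 := by
  induction l generalizing a b with
  | nil => simpa using hab
  | cons x t ih =>
    simp only [List.map_cons, List.foldl_cons]
    exact ih _ _ (by rw [hab, hgh x (by simp), ← min_sub_sub_right]) (fun y hy => hgh y (by simp [hy]))

-- main loop characterisation: with enough fuel, the loop adds the min count to rounds
theorem pvLoop_eq (fuel : Nat) (needed pool : List Char) (r : Int)
    (hnd : needed.Nodup) (hfuel : pool.length < fuel) :
    pvLoop fuel needed pool r = r + pvMC needed pool := by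
  induction fuel generalizing pool r with
  | zero => omega
  | succ fuel ih =>
    show (if needed ≠ [] ∧ needed.all (fun ch => pool.contains ch) then
        pvLoop fuel needed (pvRemoveAll needed pool) (r + 1)
      else r) = r + pvMC needed pool
    by_cases hcond : needed ≠ [] ∧ needed.all (fun ch => pool.contains ch)
    · rw [if_pos hcond]
      obtain ⟨hne, hallb⟩ := hcond
      obtain ⟨c, t, rfl⟩ : ∃ c t, needed = c :: t := by
        cases needed with
        | nil => exact absurd rfl hne
        | cons c t => exact ⟨c, t, rfl⟩
      have hall : ∀ x ∈ c :: t, x ∈ pool := by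
        intro x hx
        have := List.all_eq_true.mp hallb x hx
        simpa using this
      have hlt : (pvRemoveAll (c :: t) pool).length < pool.length :=
        pvRemoveAll_length_lt c t pool (hall c (by simp))
      rw [ih (pvRemoveAll (c :: t) pool) (r + 1) (by omega)]
      -- counts in the new pool are the old counts minus one
      have hcnt : ∀ x ∈ c :: t,
          ((pvRemoveAll (c :: t) pool).count x : Int) = (pool.count x : Int) - 1 := by
        intro x hx
        rw [pvRemoveAll_count (c :: t) pool hnd hall x, if_pos hx]
        have hpos : 0 < pool.count x := List.count_pos_iff.mpr (hall x hx)
        omega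
      have hmc : pvMC (c :: t) (pvRemoveAll (c :: t) pool) = pvMC (c :: t) pool - 1 := by
        show (t.map (fun ch => ((pvRemoveAll (c :: t) pool).count ch : Int))).foldl min
              (((pvRemoveAll (c :: t) pool).count c : Int))
            = (t.map (fun ch => (pool.count ch : Int))).foldl min ((pool.count c : Int)) - 1
        exact foldl_min_sub_one t _ _ _ _ (hcnt c (by simp))
          (fun y hy => hcnt y (by simp [hy]))
      rw [hmc]
      ring
    · rw [if_neg hcond]
      -- some needed letter is absent (or needed is empty): the min count is 0
      cases hne : needed with
      | nil => simp [pvMC]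
      | cons c t =>
        subst hne
        have : ¬ (c :: t).all (fun ch => pool.contains ch) := by
          intro h; exact hcond ⟨by simp, h⟩
        obtain ⟨x, hx, hxp⟩ : ∃ x ∈ c :: t, x ∉ pool := by
          by_contra hno
          push_neg at hno
          exact this (List.all_eq_true.mpr (fun y hy => by simpa using hno y hy))
        have hx0 : (pool.count x : Int) = 0 := by
          have := List.count_eq_zero.mpr hxp
          omega
        have hnn : (0:Int) ≤ pvMC (c :: t) pool := by
          show (0:Int) ≤ (t.map (fun ch => (pool.count ch : Int))).foldl min ((pool.count c : Int))
          exact foldl_min_nonneg _ _ (by positivity) (by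
            intro y hy
            obtain ⟨ch, _, rfl⟩ := List.mem_map.mp hy
            positivity)
        have hle : pvMC (c :: t) pool ≤ 0 := by
          show (t.map (fun ch => (pool.count ch : Int))).foldl min ((pool.count c : Int)) ≤ 0
          rcases List.mem_cons.mp hx with h | h
          · subst h
            exact hx0 ▸ foldl_min_le_init _ _
          · exact hx0 ▸ foldl_min_le_mem _ _ _ (List.mem_map.mpr ⟨x, h, rfl⟩)
        omega

-- A's zero-initialisation pass: every lookup (default 0) is 0
theorem getD_init_zero (l : List Char) (d : PySem.Dict Char Int)
    (h : ∀ k, d.getD k 0 = 0) (k : Char) :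
    (l.foldl (fun d letter => d.insert letter 0) d).getD k 0 = 0 := by
  induction l generalizing d with
  | nil => exact h k
  | cons c t ih =>
    refine ih _ (fun k' => ?_)
    rw [PySem.Dict.getD_insert]
    split <;> simp [h]

-- A's counting pass keeps the key set and adds, for present keys, the count in l
theorem count_pass (l : List Char) (d : PySem.Dict Char Int) :
    (l.foldl (fun d letter => if d.contains letter then d.modify letter 0 (· + 1) else d) d).keys
      = d.keys ∧
    ∀ k, (l.foldl (fun d letter => if d.contains letter then d.modify letter 0 (· + 1) else d) d).getD k 0
      = d.getD k 0 + (if d.contains k then (l.count k : Int) else 0) := by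
  induction l generalizing d with
  | nil => simp
  | cons c t ih =>
    simp only [List.foldl_cons]
    by_cases hc : d.contains c = true
    · rw [if_pos hc]
      obtain ⟨hk, hg⟩ := ih (d.modify c 0 (· + 1))
      constructor
      · rw [hk, PySem.Dict.keys_modify, PySem.Dict.keys_insert_of_contains _ _ hc]
      · intro k
        rw [hg k, PySem.Dict.getD_modify, PySem.Dict.contains_modify]
        by_cases hkc : k = c
        · subst hkc
          simp [hc]
          ring
        · rw [if_neg hkc]
          have hbc : (k == c) = false := by simp [hkc]
          have hck : ¬c = k := fun h => hkc h.symm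
          rw [hbc]
          simp only [Bool.false_or]
          by_cases hdk : d.contains k = true
          · simp [hdk, hck]
          · simp [hdk]
    · rw [if_neg hc]
      obtain ⟨hk, hg⟩ := ih d
      refine ⟨hk, fun k => ?_⟩
      rw [hg k]
      by_cases hkc : k = c
      · subst hkc; simp [hc]
      · have hck : ¬c = k := fun h => hkc h.symm
        by_cases hdk : d.contains k = true
        · simp [hdk, hck]
        · simp [hdk]

-- ===== VERDICT =====
theorem count_counstructed_strings_spec : Claim_equal_count_counstructed_strings := by
  unfold Claim_equal_count_counstructed_strings
  intro s1 s2 _ hpre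
  unfold Spec_count_counstructed_strings count_counstructed_strings count_counstructed_strings_alt
  simp only []
  set d0 : PySem.Dict Char Int :=
    s1.toList.foldl (fun d letter => d.insert letter 0) PySem.Dict.empty with hd0
  set d1 : PySem.Dict Char Int :=
    s2.toList.foldl (fun d letter => if d.contains letter then d.modify letter 0 (· + 1) else d) d0 with hd1
  have hkeys0 : d0.keys = PySem.Set.ofList s1.toList := by
    rw [hd0, PySem.Dict.keys_foldl_insert, PySem.Dict.keys_empty, PySem.Set.update_nil_left]
  have hget0 : ∀ k, d0.getD k 0 = 0 := by
    intro k
    rw [hd0]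
    exact getD_init_zero _ _ (fun k => by simp [PySem.Dict.getD_empty]) k
  obtain ⟨hkeys1, hget1⟩ := count_pass s2.toList d0
  rw [← hd1] at hkeys1 hget1
  have hnd : d1.keys.Nodup := by
    rw [hkeys1, hkeys0]; exact PySem.Set.nodup_ofList _
  have hvals : d1.values
      = (PySem.Set.ofList s1.toList).map (fun ch => (s2.toList.count ch : Int)) := by
    rw [PySem.Dict.values_eq_map_keys d1 hnd 0, hkeys1, hkeys0]
    apply List.map_congr_left
    intro k hk
    have hc : d0.contains k = true := by
      rw [PySem.Dict.contains_iff_mem_keys, hkeys0]; exact hk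
    rw [hget1 k, hget0 k, if_pos hc, zero_add]
  rw [hvals]
  -- string1 is nonempty, so its distinct-letter set is nonempty
  obtain ⟨c, t, hct⟩ : ∃ c t, PySem.Set.ofList s1.toList = c :: t := by
    cases hs : PySem.Set.ofList s1.toList with
    | nil =>
      exfalso
      cases h1 : s1.toList with
      | nil => exact hpre (by cases s1; simp_all)
      | cons a l =>
        have : a ∈ PySem.Set.ofList s1.toList :=
          (PySem.Set.mem_ofList _ _).mpr (by rw [h1]; simp)
        rw [hs] at this; cases this
    | cons c t => exact ⟨c, t, rfl⟩
  rw [hct, List.map_cons, PySem.List.min?_id_cons]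
  rw [pvLoop_eq _ _ _ _ (by rw [← hct]; exact PySem.Set.nodup_ofList _) (by omega)]
  simp [pvMC]
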